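-- pv_equiv track=rewrite | github.com/ajaychinni/Data-structures-and-algorithms | sorting/sortalphanumeric.py | sort_all
-- ===== SOURCE A (Python) =====
-- def append_ele(lst,i, flag):
--   #check if lst empty
--   if lst:
--       for j in range(len(lst)):
--         if lst[j] < i:
--           pass
--         else:
--           flag = 1
--           lst = lst[:j] + i + lst[j:]
--           break
--       # when there is no elemnt in our list greater than the elemnt to be inserted we append that element in the last
--       if flag == 0:
--         lst  = lst + i
--   #add the first element
--   else:
--     lst  = lst + i
--   return lst
--
-- def sort_all(s):
--   num = ''
--   caps = ''
--   lower = ''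
--   for i in s:
--     flag = 0
--     if i.isnumeric():
--       num  = append_ele(num,i,flag)
--     elif i.isupper():
--       caps = append_ele(caps,i,flag)
--     else:
--       lower = append_ele(lower,i,flag)
--   return caps+lower+num
-- ===== SOURCE B (Python) =====
-- def sort_all(s):
--     return ''.join(sorted(s, key=lambda c: (2 if c.isnumeric() else 0 if c.isupper() else 1, c)))
-- ===== Notes on version B (the rewrite author's own statement) =====
-- stated objective: simpler
-- what changed: Replaced A's three manually maintained insertion-sorted buckets (per-character scan-and-slice insertion) by a single stable sort of the whole string keyed on (category rank, char), with numeric tested before upper to keep A's precedence.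
import Mathlib
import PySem

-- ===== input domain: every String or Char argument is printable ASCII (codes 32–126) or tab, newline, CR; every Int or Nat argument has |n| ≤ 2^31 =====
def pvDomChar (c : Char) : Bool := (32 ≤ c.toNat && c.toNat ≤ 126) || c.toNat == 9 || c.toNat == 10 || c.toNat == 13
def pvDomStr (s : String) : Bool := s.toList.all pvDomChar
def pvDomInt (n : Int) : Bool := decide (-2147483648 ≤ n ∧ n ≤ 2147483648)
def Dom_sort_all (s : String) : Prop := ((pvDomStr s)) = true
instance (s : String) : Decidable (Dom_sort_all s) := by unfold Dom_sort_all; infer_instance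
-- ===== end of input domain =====

-- B replaces A's three hand-maintained insertion-sorted buckets by one stable keyed sort (objective: simpler).
-- On the ASCII domain, Python's `i.isnumeric()` on a single character coincides with isdigit; ported via PySem.Chars.isdigit (exact on Dom).

-- ===== PORT A =====
-- the `for j in range(len(lst)): … break` scan of append_ele (flag/slice insertion kept step for step)
def appendEleLoop (lst : List Char) (i : Char) (j : Nat) (flag : Int) : List Char × Int :=
  if h : j < lst.length then
    if lst[j] < i then appendEleLoop lst i (j + 1) flag
    else (lst.take j ++ i :: lst.drop j, 1)
  else (lst, flag)
termination_by lst.length - j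

def append_ele (lst : List Char) (i : Char) (flag : Int) : List Char :=
  if lst ≠ [] then
    let r := appendEleLoop lst i 0 flag
    if r.2 == 0 then r.1 ++ [i] else r.1
  else lst ++ [i]

-- the body of A's `for i in s` loop (state = (num, caps, lower), flag reset to 0 each iteration)
def sortStep (st : List Char × List Char × List Char) (i : Char) : List Char × List Char × List Char :=
  let flag : Int := 0
  if PySem.Chars.isdigit i then (append_ele st.1 i flag, st.2.1, st.2.2)
  else if PySem.Chars.isupper i then (st.1, append_ele st.2.1 i flag, st.2.2)
  else (st.1, st.2.1, append_ele st.2.2 i flag)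

def sort_all (s : String) : String :=
  let r := s.toList.foldl sortStep ([], [], [])
  String.ofList (r.2.1 ++ r.2.2 ++ r.1)

-- ===== PORT B =====
-- ''.join(sorted(s, key=lambda c: (2 if c.isnumeric() else 0 if c.isupper() else 1, c)))
def sort_all_alt (s : String) : String :=
  String.ofList (PySem.List.sorted2 s.toList
    (fun c => if PySem.Chars.isdigit c then (2 : Int) else if PySem.Chars.isupper c then 0 else 1)
    (fun c => c) false)

-- ===== PRECONDITION & SPEC =====
def Spec_sort_all (s : String) (out : String) : Prop := out = sort_all_alt s
instance (s : String) (out : String) : Decidable (Spec_sort_all s out) := by unfold Spec_sort_all; infer_instance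

-- ===== CLAIM (what is proved, stated in full; the proofs are below) =====
def Claim_equal_sort_all : Prop := ∀ (s : String), Dom_sort_all s → Spec_sort_all s (sort_all s)

-- ===== LEMMAS AND PROOFS =====

-- B's key, packaged as one lexicographic key
def pvRk (c : Char) : Int := if PySem.Chars.isdigit c then 2 else if PySem.Chars.isupper c then 0 else 1
def pvKey (c : Char) : Lex (Int × Char) := toLex (pvRk c, c)

-- bucket predicates (with A's test order: numeric first, then upper)
def pvPd (c : Char) : Bool := PySem.Chars.isdigit c
def pvPu (c : Char) : Bool := !PySem.Chars.isdigit c && PySem.Chars.isupper c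
def pvPl (c : Char) : Bool := !PySem.Chars.isdigit c && !PySem.Chars.isupper c

lemma pvKey_injective : Function.Injective pvKey := by
  intro a b h
  have : (pvRk a, a) = (pvRk b, b) := congrArg ofLex h
  exact (Prod.mk.injEq _ _ _ _ ▸ this).2

lemma pvKey_le_iff (a b : Char) : pvKey a ≤ pvKey b ↔ pvRk a < pvRk b ∨ (pvRk a = pvRk b ∧ a ≤ b) := by
  simp [pvKey, Prod.Lex.le_iff]

-- sorted2 with these keys is sorted with the packaged lexicographic key
lemma sorted2_eq_sorted_pvKey (xs : List Char) :
    PySem.List.sorted2 xs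
      (fun c => if PySem.Chars.isdigit c then (2 : Int) else if PySem.Chars.isupper c then 0 else 1)
      (fun c => c) false = PySem.List.sorted xs pvKey false := by
  show xs.foldl (fun acc x => PySem.List.insertBy _ x acc) [] = xs.foldl (fun acc x => PySem.List.insertBy _ x acc) []
  congr 1
  funext acc x
  congr 1
  funext a b
  show (decide (pvRk a < pvRk b) || (!decide (pvRk b < pvRk a) && decide (a < b)))
      = decide (pvKey a < pvKey b)
  have h : (pvKey a < pvKey b) ↔ (pvRk a < pvRk b ∨ (pvRk a = pvRk b ∧ a < b)) := by
    simp [pvKey, Prod.Lex.lt_iff]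
  rcases lt_trichotomy (pvRk a) (pvRk b) with h1 | h1 | h1
  · simp [h, h1]
  · simp [h, h1]
  · simp [h, not_lt_of_gt h1, h1, ne_of_gt h1]

-- A's inner loop computes Mathlib's orderedInsert past position j
lemma appendEleLoop_spec (i : Char) : ∀ (k : Nat) (lst : List Char) (j : Nat), j + k = lst.length →
    (if (appendEleLoop lst i j 0).2 == (0 : Int) then (appendEleLoop lst i j 0).1 ++ [i]
     else (appendEleLoop lst i j 0).1)
      = lst.take j ++ List.orderedInsert (· ≤ ·) i (lst.drop j) := by
  intro k
  induction k with
  | zero =>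
    intro lst j hj
    have h1 : lst.length ≤ j := by omega
    rw [appendEleLoop]
    simp [show ¬ j < lst.length by omega, List.take_of_length_le h1,
      List.drop_of_length_le h1]
  | succ k ih =>
    intro lst j hj
    have hjl : j < lst.length := by omega
    have hdrop : lst.drop j = lst[j] :: lst.drop (j + 1) := List.drop_eq_getElem_cons hjl
    rw [appendEleLoop, dif_pos hjl]
    by_cases hlt : lst[j] < i
    · rw [if_pos hlt, ih lst (j + 1) (by omega), hdrop, List.orderedInsert,
        if_neg (not_le.mpr hlt), List.take_add_one, List.getElem?_eq_getElem hjl]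
      simp only [Option.toList_some, List.append_assoc, List.singleton_append]
    · rw [if_neg hlt]
      simp only [show ((1 : Int) == 0) = false by decide, Bool.false_eq_true, if_false]
      rw [hdrop, List.orderedInsert, if_pos (not_lt.mp hlt)]

lemma append_ele_eq_orderedInsert (lst : List Char) (i : Char) :
    append_ele lst i 0 = List.orderedInsert (· ≤ ·) i lst := by
  rcases lst with _ | ⟨x, t⟩
  · simp [append_ele, List.orderedInsert]
  · have h := appendEleLoop_spec i (x :: t).length (x :: t) 0 (by omega)
    simpa [append_ele] using h

lemma orderedInsert_pairwise {l : List Char} (i : Char) (h : l.Pairwise (· ≤ ·)) :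
    (List.orderedInsert (· ≤ ·) i l).Pairwise (· ≤ ·) :=
  List.Sorted.orderedInsert i l h

-- invariant of A's main loop: each bucket stays sorted and collects its filter
lemma fold_inv : ∀ (l : List Char) (n c lo : List Char),
    n.Pairwise (· ≤ ·) → c.Pairwise (· ≤ ·) → lo.Pairwise (· ≤ ·) →
    ((l.foldl sortStep (n, c, lo)).1.Pairwise (· ≤ ·) ∧
      (l.foldl sortStep (n, c, lo)).1.Perm (n ++ l.filter pvPd)) ∧
    ((l.foldl sortStep (n, c, lo)).2.1.Pairwise (· ≤ ·) ∧
      (l.foldl sortStep (n, c, lo)).2.1.Perm (c ++ l.filter pvPu)) ∧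
    ((l.foldl sortStep (n, c, lo)).2.2.Pairwise (· ≤ ·) ∧
      (l.foldl sortStep (n, c, lo)).2.2.Perm (lo ++ l.filter pvPl)) := by
  intro l
  induction l with
  | nil => intro n c lo hn hc hlo; simp [hn, hc, hlo, List.Perm.refl]
  | cons x t ih =>
    intro n c lo hn hc hlo
    by_cases hd : PySem.Chars.isdigit x
    · have hstep : sortStep (n, c, lo) x = (List.orderedInsert (· ≤ ·) x n, c, lo) := by
        simp [sortStep, hd, append_ele_eq_orderedInsert]
      have h := ih (List.orderedInsert (· ≤ ·) x n) c lo (orderedInsert_pairwise x hn) hc hlo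
      simp only [List.foldl_cons, hstep] at *
      refine ⟨⟨h.1.1, ?_⟩, ⟨h.2.1.1, ?_⟩, ⟨h.2.2.1, ?_⟩⟩
      · refine h.1.2.trans ?_
        simp only [List.filter_cons, pvPd, hd, if_true]
        exact ((List.perm_orderedInsert _ x n).append_right _).trans List.perm_middle.symm
      · simpa [List.filter_cons, pvPu, hd] using h.2.1.2
      · simpa [List.filter_cons, pvPl, hd] using h.2.2.2
    · by_cases hu : PySem.Chars.isupper x
      · have hstep : sortStep (n, c, lo) x = (n, List.orderedInsert (· ≤ ·) x c, lo) := by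
          simp [sortStep, hd, hu, append_ele_eq_orderedInsert]
        have h := ih n (List.orderedInsert (· ≤ ·) x c) lo hn (orderedInsert_pairwise x hc) hlo
        simp only [List.foldl_cons, hstep] at *
        refine ⟨⟨h.1.1, ?_⟩, ⟨h.2.1.1, ?_⟩, ⟨h.2.2.1, ?_⟩⟩
        · simpa [List.filter_cons, pvPd, hd] using h.1.2
        · refine h.2.1.2.trans ?_
          simp only [List.filter_cons, pvPu, hd, hu]
          exact ((List.perm_orderedInsert _ x c).append_right _).trans List.perm_middle.symm
        · simpa [List.filter_cons, pvPl, hd, hu] using h.2.2.2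
      · have hstep : sortStep (n, c, lo) x = (n, c, List.orderedInsert (· ≤ ·) x lo) := by
          simp [sortStep, hd, hu, append_ele_eq_orderedInsert]
        have h := ih n c (List.orderedInsert (· ≤ ·) x lo) hn hc (orderedInsert_pairwise x hlo)
        simp only [List.foldl_cons, hstep] at *
        refine ⟨⟨h.1.1, ?_⟩, ⟨h.2.1.1, ?_⟩, ⟨h.2.2.1, ?_⟩⟩
        · simpa [List.filter_cons, pvPd, hd] using h.1.2
        · simpa [List.filter_cons, pvPu, hd, hu] using h.2.1.2
        · refine h.2.2.2.trans ?_
          simp only [List.filter_cons, pvPl, hd, hu]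
          exact ((List.perm_orderedInsert _ x lo).append_right _).trans List.perm_middle.symm

-- the three buckets partition the input
lemma part_perm : ∀ l : List Char, (l.filter pvPu ++ l.filter pvPl ++ l.filter pvPd).Perm l := by
  intro l
  induction l with
  | nil => simp
  | cons x t ih =>
    by_cases hd : PySem.Chars.isdigit x
    · simp only [List.filter_cons, pvPd, pvPu, pvPl, hd, Bool.not_true, Bool.false_and,
        if_true, if_false]
      exact List.perm_middle.trans (ih.cons x)
    · by_cases hu : PySem.Chars.isupper x
      · simp only [List.filter_cons, pvPd, pvPu, pvPl, hd, hu, Bool.not_false, Bool.true_and,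
          if_true, if_false]
        exact ih.cons x
      · simp only [List.filter_cons, pvPd, pvPu, pvPl, hd, hu, Bool.not_false, Bool.true_and,
          Bool.and_self, if_true, if_false]
        have h2 : (t.filter pvPu ++ (t.filter pvPl ++ t.filter pvPd)).Perm t := by
          simpa [List.append_assoc] using ih
        rw [List.append_assoc, List.cons_append]
        exact List.perm_middle.trans (h2.cons x)

lemma rk_of_pu {a : Char} (h : pvPu a = true) : pvRk a = 0 := by
  simp only [pvPu, Bool.and_eq_true, Bool.not_eq_true'] at h
  simp [pvRk, h.1, h.2]

lemma rk_of_pl {a : Char} (h : pvPl a = true) : pvRk a = 1 := by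
  simp only [pvPl, Bool.and_eq_true, Bool.not_eq_true'] at h
  simp [pvRk, h.1, h.2]

lemma rk_of_pd {a : Char} (h : pvPd a = true) : pvRk a = 2 := by
  simp only [pvPd] at h
  simp [pvRk, h]

-- sorted-by-char within a single bucket (constant rank) is sorted by pvKey
lemma pairwise_key_of_bucket {l : List Char} {p : Char → Bool} {r : Int}
    (hmem : ∀ a ∈ l, p a = true) (hrk : ∀ a, p a = true → pvRk a = r)
    (h : l.Pairwise (· ≤ ·)) : l.Pairwise (fun a b => pvKey a ≤ pvKey b) := by
  refine h.imp_of_mem ?_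
  intro a b ha hb hab
  exact (pvKey_le_iff a b).mpr (Or.inr ⟨by rw [hrk a (hmem a ha), hrk b (hmem b hb)], hab⟩)

theorem sort_all_eq_alt (s : String) : sort_all s = sort_all_alt s := by
  have h := fold_inv s.toList [] [] [] (List.Pairwise.nil) (List.Pairwise.nil) (List.Pairwise.nil)
  set r := s.toList.foldl sortStep ([], [], []) with hr
  obtain ⟨⟨hnp, hnperm⟩, ⟨hcp, hcperm⟩, ⟨hlp, hlperm⟩⟩ := h
  simp only [List.nil_append] at hnperm hcperm hlperm
  -- membership facts for the buckets
  have hmemc : ∀ a ∈ r.2.1, pvPu a = true := fun a ha =>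
    List.of_mem_filter (hcperm.mem_iff.mp ha)
  have hmeml : ∀ a ∈ r.2.2, pvPl a = true := fun a ha =>
    List.of_mem_filter (hlperm.mem_iff.mp ha)
  have hmemn : ∀ a ∈ r.1, pvPd a = true := fun a ha =>
    List.of_mem_filter (hnperm.mem_iff.mp ha)
  -- A's output list
  set la := r.2.1 ++ r.2.2 ++ r.1 with hla
  -- la is a permutation of the input
  have hperm : la.Perm s.toList := by
    refine (((hcperm.append hlperm).append hnperm)).trans (part_perm s.toList)
  -- la is pairwise sorted by pvKey
  have hpw : la.Pairwise (fun a b => pvKey a ≤ pvKey b) := by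
    rw [hla]
    rw [List.pairwise_append]
    refine ⟨?_, ?_, ?_⟩
    · rw [List.pairwise_append]
      refine ⟨pairwise_key_of_bucket hmemc (fun a => rk_of_pu) hcp,
        pairwise_key_of_bucket hmeml (fun a => rk_of_pl) hlp, ?_⟩
      intro a ha b hb
      exact (pvKey_le_iff a b).mpr (Or.inl (by
        rw [rk_of_pu (hmemc a ha), rk_of_pl (hmeml b hb)]; norm_num))
    · exact pairwise_key_of_bucket hmemn (fun a => rk_of_pd) hnp
    · intro a ha b hb
      rcases List.mem_append.mp ha with h1 | h1
      · exact (pvKey_le_iff a b).mpr (Or.inl (by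
          rw [rk_of_pu (hmemc a h1), rk_of_pd (hmemn b hb)]; norm_num))
      · exact (pvKey_le_iff a b).mpr (Or.inl (by
          rw [rk_of_pl (hmeml a h1), rk_of_pd (hmemn b hb)]; norm_num))
  -- B's list is exactly la
  have hb : PySem.List.sorted s.toList pvKey false = la := by
    calc PySem.List.sorted s.toList pvKey false
        = PySem.List.sorted la pvKey false :=
          PySem.List.sorted_eq_sorted_of_perm _ _ _ pvKey_injective hperm.symm
      _ = la := PySem.List.sorted_eq_self_of_pairwise _ _ hpw
  show String.ofList la = sort_all_alt s
  rw [sort_all_alt, sorted2_eq_sorted_pvKey, hb]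

-- ===== VERDICT (by name: the statement is the Claim_ definition above) =====
theorem sort_all_spec : Claim_equal_sort_all := by
  intro s _
  show sort_all s = sort_all_alt s
  exact sort_all_eq_alt s
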